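-- pv_equiv track=rewrite | github.com/danielforgacs/LostCitiesScore | scorecounter.py | count_colour
-- ===== SOURCE A (Python) =====
-- def count_colour(scoretext):
--     totalscrore = -20
--     multiplier = 1
--     count = 0
--
--     for count, item in enumerate(scoretext):
--         if item == 'd':
--             multiplier += 1
--         elif item == '1':
--             totalscrore += 10
--         else:
--             totalscrore += int(item)
--
--
--     totalscrore *= multiplier
--
--     if count > 7:
--         totalscrore += 20
--
--     return totalscrore
-- ===== SOURCE B (Python) =====
-- def count_colour(scoretext):
--     def go(chars):
--         # recursively score the suffix: returns (base score, multiplier)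
--         if not chars:
--             return (-20, 1)
--         total, mult = go(chars[1:])
--         c = chars[0]
--         if c == 'd':
--             return (total, mult + 1)
--         return (total + (10 if c == '1' else int(c)), mult)
--
--     total, mult = go(scoretext)
--     result = total * mult
--     if len(scoretext) > 8:
--         result += 20
--     return result
-- ===== Notes on version B (the rewrite author's own statement) =====
-- stated objective: alternative
-- what changed: Replaces A's iterative loop with three interleaved accumulators (score, multiplier, last enumerate index) by a structural recursion on the string that returns a (base, multiplier) pair built from the right, with the product and the length-based bonus applied once at the top.
import Mathlib
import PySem

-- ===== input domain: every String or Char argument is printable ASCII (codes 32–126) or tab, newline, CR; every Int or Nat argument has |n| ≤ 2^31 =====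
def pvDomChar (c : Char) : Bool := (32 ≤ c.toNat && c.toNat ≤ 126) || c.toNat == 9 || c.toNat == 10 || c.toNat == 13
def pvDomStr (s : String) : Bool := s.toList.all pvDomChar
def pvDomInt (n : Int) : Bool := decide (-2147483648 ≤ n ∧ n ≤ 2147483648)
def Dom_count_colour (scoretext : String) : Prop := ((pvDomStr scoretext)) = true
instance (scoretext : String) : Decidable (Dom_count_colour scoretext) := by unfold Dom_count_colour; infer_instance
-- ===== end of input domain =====

-- B replaces A's single interleaved loop (three accumulators) by a structural recursion
-- on the string returning a (base, multiplier) pair from the right (objective: alternative).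


-- ===== PORT A =====
-- int(item) for a single character; Python raises ValueError where ofStr? = none (outside Pre_)
def pyInt1 (c : Char) : Int := (PySem.Int.ofStr? (String.ofList [c])).getD 0

def count_colour (scoretext : String) : Int :=
  let st := (PySem.List.enumerate scoretext.toList 0).foldl
    (fun (acc : Int × Int × Int) p =>
      if p.2 = 'd' then (acc.1, acc.2.1 + 1, p.1)
      else if p.2 = '1' then (acc.1 + 10, acc.2.1, p.1)
      else (acc.1 + pyInt1 p.2, acc.2.1, p.1))
    (-20, 1, 0)
  let total := st.1 * st.2.1
  if st.2.2 > 7 then total + 20 else total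

-- ===== PORT B =====
-- the inner recursive helper 'go' of Source B: scores the suffix, returns (base, multiplier)
def ccGo : List Char → Int × Int
  | [] => (-20, 1)
  | c :: rest =>
    let p := ccGo rest
    if c = 'd' then (p.1, p.2 + 1)
    else (p.1 + (if c = '1' then 10 else pyInt1 c), p.2)

def count_colour_alt (scoretext : String) : Int :=
  let p := ccGo scoretext.toList
  let result := p.1 * p.2
  if PySem.Str.len scoretext > 8 then result + 20 else result

-- ===== PRECONDITION & SPEC =====
-- Pre_ excludes exactly the inputs on which the Python A raises ValueError:
-- any character that is neither the doubling marker nor an ASCII digit makes int(item) raise.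
def Pre_count_colour (scoretext : String) : Prop :=
  (scoretext.toList.all (fun c => c == 'd' || ('0' ≤ c && c ≤ '9'))) = true
instance (scoretext : String) : Decidable (Pre_count_colour scoretext) := by
  unfold Pre_count_colour; infer_instance
def pvWitness_count_colour : String := "d15"

def Spec_count_colour (scoretext : String) (out : Int) : Prop := out = count_colour_alt scoretext
instance (scoretext : String) (out : Int) : Decidable (Spec_count_colour scoretext out) := by unfold Spec_count_colour; infer_instance

-- ===== CLAIM (what is proved, stated in full; the proofs are below) =====
def Claim_equal_count_colour : Prop := ∀ (scoretext : String), Dom_count_colour scoretext → Pre_count_colour scoretext → Spec_count_colour scoretext (count_colour scoretext)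

-- ===== LEMMAS AND PROOFS =====

-- the summand added for a non-'d' character (both programs add the same amount)
def chVal (c : Char) : Int := if c = '1' then 10 else pyInt1 c

theorem foldl_chVal_shift (ys : List Char) (a b : Int) :
    ys.foldl (fun s x => s + chVal x) (a + b) =
    a + ys.foldl (fun s x => s + chVal x) b := by
  induction ys generalizing b with
  | nil => simp
  | cons y t ih =>
    simp only [List.foldl_cons]
    rw [show a + b + chVal y = a + (b + chVal y) by ring, ih]

-- the state reached by A's loop, from any start index and initial state
theorem foldA_eq (l : List Char) (s : Nat) (t m c : Int) :
    (PySem.List.enumerate l (s : Int)).foldl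
      (fun (acc : Int × Int × Int) p =>
        if p.2 = 'd' then (acc.1, acc.2.1 + 1, p.1)
        else if p.2 = '1' then (acc.1 + 10, acc.2.1, p.1)
        else (acc.1 + pyInt1 p.2, acc.2.1, p.1)) (t, m, c)
    = (t + (l.filter (· ≠ 'd')).foldl (fun a x => a + chVal x) 0,
       m + (l.count 'd' : Int),
       if l = [] then c else (s : Int) + l.length - 1) := by
  induction l generalizing s t m c with
  | nil => simp [PySem.List.enumerate_nil]
  | cons x xs ih =>
    rw [PySem.List.enumerate_cons]
    simp only [List.foldl_cons]
    have hs : ((s : Int) + 1) = ((s + 1 : Nat) : Int) := by push_cast; ring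
    by_cases hx : x = 'd'
    · rw [if_pos hx, hs, ih]
      subst hx
      simp only [List.filter_cons, List.count_cons]
      cases xs with
      | nil => simp
      | cons y ys =>
        simp
        refine ⟨by ring_nf, by omega⟩
    · by_cases h1 : x = '1'
      · rw [if_neg hx, if_pos h1, hs, ih]
        simp only [List.filter_cons, List.count_cons]
        cases xs with
        | nil => simp [h1, chVal]
        | cons y ys =>
          simp [h1]
          refine ⟨?_, by omega⟩
          have h := foldl_chVal_shift ((y :: ys).filter (fun x => !decide (x = 'd'))) (chVal '1') 0
          rw [add_zero] at h
          rw [h]; simp [chVal]; ring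
      · rw [if_neg hx, if_neg h1, hs, ih]
        simp only [List.filter_cons, List.count_cons]
        cases xs with
        | nil => simp [hx, h1, chVal]
        | cons y ys =>
          simp [hx]
          refine ⟨?_, by omega⟩
          have h := foldl_chVal_shift ((y :: ys).filter (fun x => !decide (x = 'd'))) (chVal x) 0
          rw [add_zero] at h
          rw [h]; simp [chVal, h1]; ring

-- B's recursion computes the same filtered sum and 'd' count
theorem ccGo_eq (l : List Char) :
    ccGo l = (-20 + (l.filter (· ≠ 'd')).foldl (fun a x => a + chVal x) 0,
              1 + (l.count 'd' : Int)) := by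
  induction l with
  | nil => simp [ccGo]
  | cons x xs ih =>
    rw [ccGo]
    simp only [ih, List.filter_cons, List.count_cons]
    by_cases hx : x = 'd'
    · simp [hx]; push_cast; ring
    · simp [hx]
      have h := foldl_chVal_shift (xs.filter (fun x => !decide (x = 'd'))) (chVal x) 0
      rw [add_zero] at h
      rw [h]; simp [chVal]; ring

-- ===== VERDICT (by name: the statement is the Claim_ definition above) =====
theorem count_colour_spec : Claim_equal_count_colour := by
  intro s _ _
  unfold Spec_count_colour count_colour count_colour_alt
  have h0 : (0 : Int) = ((0 : Nat) : Int) := rfl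
  rw [h0, foldA_eq, ccGo_eq]
  simp only [PySem.Str.len_eq]
  cases hl : s.toList with
  | nil => simp
  | cons y ys =>
    simp
    split_ifs with hA hB hB <;> [skip; omega; omega; skip] <;> ring
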